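-- pv_equiv track=rewrite | github.com/kodsnack/advent_of_code_2020 | estomagordo-python3/20b.py | flipturns
-- ===== SOURCE A (Python) =====
-- def flipx(image):
--     return tuple([tuple(row[::-1]) for row in image])
--
-- def flipy(image):
--     return tuple(tuple(row) for row in image[::-1])
--
-- def rot(image):
--     # uglyfuckery
--
--     im = []
--     row = []
--
--     for x in range(len(image[0])):
--         for y in range(len(image)):
--             row.append(image[y][x])
--         im.append(row[::-1])
--         row = []
--
--     if row:
--         im.append(row)
--
--     return tuple(tuple(row) for row in im)
--
-- def flipturns(image):
--     out = set()
--
--     for turns in range(4):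
--         image = rot(image)
--         out.add(image)
--         out.add(flipx(image))
--         out.add(flipy(image))
--
--     return out
-- ===== SOURCE B (Python) =====
-- def flipturns(image):
--     # One rotation up front, then every one of the eight dihedral symmetries of the
--     # (now rectangular) grid is produced directly by a closed-form index remapping,
--     # instead of iterating rot/flipx/flipy four times.
--     h, w = len(image), len(image[0])
--     b = [[image[h - 1 - j][i] for j in range(h)] for i in range(w)]
--     H, W = w, h  # b is H rows of length W
--     syms = [
--         [[b[i][j] for j in range(W)] for i in range(H)],          # identity
--         [[b[i][W - 1 - j] for j in range(W)] for i in range(H)],  # horizontal flip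
--         [[b[H - 1 - i][j] for j in range(W)] for i in range(H)],  # vertical flip
--         [[b[H - 1 - j][i] for j in range(H)] for i in range(W)],  # rotate 90
--         [[b[j][i] for j in range(H)] for i in range(W)],          # transpose
--         [[b[H - 1 - j][W - 1 - i] for j in range(H)] for i in range(W)],  # anti-transpose
--         [[b[H - 1 - i][W - 1 - j] for j in range(W)] for i in range(H)],  # rotate 180
--         [[b[j][W - 1 - i] for j in range(H)] for i in range(W)],  # rotate 270
--     ]
--     out = set()
--     for s in syms:
--         out.add(tuple(tuple(row) for row in s))
--     return out
-- ===== Notes on version B (the rewrite author's own statement) =====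
-- stated objective: alternative
-- what changed: A iterates rot four times adding rot/flipx/flipy of the running image each turn; B performs a single rotation and then emits each of the eight dihedral symmetries of the resulting rectangular grid by a closed-form index remapping (no iterated rotation, no flip helpers).
import Mathlib
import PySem

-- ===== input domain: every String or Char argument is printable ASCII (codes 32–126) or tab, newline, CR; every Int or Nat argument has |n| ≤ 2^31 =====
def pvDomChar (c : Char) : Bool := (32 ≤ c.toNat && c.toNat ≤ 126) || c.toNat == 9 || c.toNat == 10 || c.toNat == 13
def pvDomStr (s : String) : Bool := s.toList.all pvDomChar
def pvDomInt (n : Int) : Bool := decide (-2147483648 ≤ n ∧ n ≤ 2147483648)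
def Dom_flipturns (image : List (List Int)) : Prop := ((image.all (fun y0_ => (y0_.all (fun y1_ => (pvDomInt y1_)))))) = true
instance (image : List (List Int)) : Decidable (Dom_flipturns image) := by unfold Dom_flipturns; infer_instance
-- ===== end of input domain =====

-- B replaces A's iterated rotate-and-flip loop by one rotation followed by closed-form
-- index remappings producing all eight dihedral symmetries (objective: alternative).


-- ===== PORT A =====
-- tuple(tuple(row[::-1]) for row in image)  ([::-1] is exactly List.reverse)
def pyFlipx (image : List (List Int)) : List (List Int) :=
  image.map (fun row => row.reverse)

-- tuple(tuple(row) for row in image[::-1])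
def pyFlipy (image : List (List Int)) : List (List Int) :=
  image.reverse

-- rot: the two nested append-loops over state (im, row); an out-of-range read
-- (IndexError in Python, excluded by Pre_) is modelled by a getD default.
-- The trailing `if row:` is kept literally (row is always [] there, as in the Python).
def pyRot (image : List (List Int)) : List (List Int) :=
  let st := (List.range (image.headD []).length).foldl
    (fun (st : List (List Int) × List Int) x =>
      let row := (List.range image.length).foldl
        (fun (row : List Int) y => row ++ [(image.getD y []).getD x 0]) st.2
      (st.1 ++ [row.reverse], []))
    ([], [])
  if st.2 ≠ [] then st.1 ++ [st.2] else st.1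

def flipturns (image : List (List Int)) : List (List (List Int)) :=
  ((List.range 4).foldl
    (fun (st : List (List Int) × PySem.Set (List (List Int))) _ =>
      let im := pyRot st.1
      (im, PySem.Set.add (PySem.Set.add (PySem.Set.add st.2 im) (pyFlipx im)) (pyFlipy im)))
    (image, PySem.Set.empty)).2

-- ===== PORT B =====
def flipturns_alt (image : List (List Int)) : List (List (List Int)) :=
  let h := image.length
  let w := (image.headD []).length
  let b := (List.range w).map (fun i => (List.range h).map
            (fun j => ((image.getD (h - 1 - j) []).getD i (0 : Int))))
  let H := w
  let W := h
  let get := fun (i j : Nat) => (b.getD i []).getD j (0 : Int)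
  let syms : List (List (List Int)) := [
    (List.range H).map (fun i => (List.range W).map (fun j => get i j)),
    (List.range H).map (fun i => (List.range W).map (fun j => get i (W - 1 - j))),
    (List.range H).map (fun i => (List.range W).map (fun j => get (H - 1 - i) j)),
    (List.range W).map (fun i => (List.range H).map (fun j => get (H - 1 - j) i)),
    (List.range W).map (fun i => (List.range H).map (fun j => get j i)),
    (List.range W).map (fun i => (List.range H).map (fun j => get (H - 1 - j) (W - 1 - i))),
    (List.range H).map (fun i => (List.range W).map (fun j => get (H - 1 - i) (W - 1 - j))),
    (List.range W).map (fun i => (List.range H).map (fun j => get j (W - 1 - i)))]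
  syms.foldl PySem.Set.add PySem.Set.empty

-- ===== PRECONDITION & SPEC =====
-- Pre_ excludes exactly the inputs on which the Python A raises IndexError:
-- an empty image or an empty first row (rot's image[0], reached again on the second
-- rot), and a row shorter than the first row (rot reads image[y][x] for x < len(image[0])).
def Pre_flipturns (image : List (List Int)) : Prop :=
  image ≠ [] ∧ 0 < (image.headD []).length ∧
    ∀ row ∈ image, (image.headD []).length ≤ row.length
instance (image : List (List Int)) : Decidable (Pre_flipturns image) := by
  unfold Pre_flipturns; infer_instance

def pvWitness_flipturns : List (List Int) := [[1, 2], [3, 4]]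

def Spec_flipturns (image : List (List Int)) (out : List (List (List Int))) : Prop := out = flipturns_alt image
instance (image : List (List Int)) (out : List (List (List Int))) : Decidable (Spec_flipturns image out) := by unfold Spec_flipturns; infer_instance

-- ===== CLAIM (what is proved, stated in full; the proofs are below) =====
def Claim_equal_flipturns : Prop := ∀ (image : List (List Int)), Dom_flipturns image → Pre_flipturns image → Spec_flipturns image (flipturns image)

-- ===== LEMMAS AND PROOFS =====

-- a grid as an index function
def pvGrid (n m : Nat) (F : Nat → Nat → Int) : List (List Int) :=
  (List.range n).map (fun i => (List.range m).map (fun j => F i j))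

theorem pv_foldl_snoc {α β : Type} (l : List α) (f : α → β) :
    ∀ init : List β, l.foldl (fun acc x => acc ++ [f x]) init = init ++ l.map f := by
  induction l with
  | nil => simp
  | cons a l ih => intro init; simp [List.foldl_cons, ih]

theorem pv_rev_map_range {α : Type} (m : Nat) (f : Nat → α) :
    ((List.range m).map f).reverse = (List.range m).map (fun j => f (m - 1 - j)) := by
  apply List.ext_getElem
  · simp
  · intro i h1 h2
    simp only [List.getElem_reverse, List.getElem_map, List.getElem_range,
      List.length_map, List.length_range]

theorem pv_grid_congr {n m : Nat} {F G : Nat → Nat → Int}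
    (h : ∀ i < n, ∀ j < m, F i j = G i j) : pvGrid n m F = pvGrid n m G := by
  unfold pvGrid
  apply List.map_congr_left
  intro i hi
  apply List.map_congr_left
  intro j hj
  exact h i (List.mem_range.mp hi) j (List.mem_range.mp hj)

theorem pv_getD_map_range {α : Type} (d : α) (f : Nat → α) {n i : Nat} (h : i < n) :
    ((List.range n).map f).getD i d = f i := by
  rw [List.getD_eq_getElem?_getD, List.getElem?_map, List.getElem?_range h]
  rfl

theorem pv_grid_getD {n m : Nat} {F : Nat → Nat → Int} {i j : Nat}
    (hi : i < n) (hj : j < m) : ((pvGrid n m F).getD i []).getD j 0 = F i j := by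
  unfold pvGrid
  rw [pv_getD_map_range _ _ hi, pv_getD_map_range _ _ hj]

-- rot of anything is the grid of the transposed-and-reversed index function
theorem pv_rot_eq_grid (image : List (List Int)) :
    pyRot image = pvGrid ((image.headD []).length) image.length
      (fun i j => (image.getD (image.length - 1 - j) []).getD i 0) := by
  unfold pyRot pvGrid
  have inner : ∀ x : Nat,
      (List.range image.length).foldl
        (fun (row : List Int) y => row ++ [(image.getD y []).getD x 0]) [] =
      (List.range image.length).map (fun y => (image.getD y []).getD x 0) := by
    intro x; rw [pv_foldl_snoc]; simp
  have outer : ∀ (l : List Nat) (acc : List (List Int)),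
      l.foldl
        (fun (st : List (List Int) × List Int) x =>
          let row := (List.range image.length).foldl
            (fun (row : List Int) y => row ++ [(image.getD y []).getD x 0]) st.2
          (st.1 ++ [row.reverse], []))
        (acc, []) =
      (acc ++ l.map (fun x =>
        ((List.range image.length).map (fun y => (image.getD y []).getD x 0)).reverse), []) := by
    intro l
    induction l with
    | nil => intro acc; simp
    | cons a l ih =>
      intro acc
      simp only [List.foldl_cons]
      rw [show ((List.range image.length).foldl
            (fun (row : List Int) y => row ++ [(image.getD y []).getD a 0]) []) =
          (List.range image.length).map (fun y => (image.getD y []).getD a 0) from inner a]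
      rw [ih]
      simp
  rw [outer]
  simp only [List.nil_append, ne_eq, not_true_eq_false]
  rw [if_neg (by simp)]
  apply List.map_congr_left
  intro x _
  rw [pv_rev_map_range]

-- flips of a grid
theorem pv_flipx_grid (n m : Nat) (F : Nat → Nat → Int) :
    pyFlipx (pvGrid n m F) = pvGrid n m (fun i j => F i (m - 1 - j)) := by
  unfold pyFlipx pvGrid
  rw [List.map_map]
  apply List.map_congr_left
  intro i _
  simp only [Function.comp]
  rw [pv_rev_map_range]

theorem pv_flipy_grid (n m : Nat) (F : Nat → Nat → Int) :
    pyFlipy (pvGrid n m F) = pvGrid n m (fun i j => F (n - 1 - i) j) := by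
  unfold pyFlipy pvGrid
  rw [pv_rev_map_range]

theorem pv_rot_grid (n m : Nat) (hn : 0 < n) (F : Nat → Nat → Int) :
    pyRot (pvGrid n m F) = pvGrid m n (fun i j => F (n - 1 - j) i) := by
  rw [pv_rot_eq_grid]
  have hlen : (pvGrid n m F).length = n := by simp [pvGrid]
  have hhead : ((pvGrid n m F).headD []).length = m := by
    unfold pvGrid
    obtain ⟨k, rfl⟩ := Nat.exists_eq_add_of_lt hn
    simp [List.range_succ_eq_map]
  rw [hlen, hhead]
  apply pv_grid_congr
  intro i hi j hj
  rw [pv_grid_getD (by omega) hi]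

-- the generic dedup identity: adding [a,b,c,d,e,f,g,c,b,k,f,e] to an empty set
-- builds the same list as adding [a,b,c,d,e,f,g,k]
theorem pv_dedup {α : Type} [BEq α] [LawfulBEq α] (a b c d e f g k : α) :
    PySem.Set.add (PySem.Set.add (PySem.Set.add (PySem.Set.add (PySem.Set.add
      (PySem.Set.add (PySem.Set.add (PySem.Set.add (PySem.Set.add (PySem.Set.add
      (PySem.Set.add (PySem.Set.add PySem.Set.empty a) b) c) d) e) f) g) c) b) k) f) e =
    PySem.Set.add (PySem.Set.add (PySem.Set.add (PySem.Set.add (PySem.Set.add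
      (PySem.Set.add (PySem.Set.add (PySem.Set.add PySem.Set.empty a) b) c) d) e) f) g) k := by
  have mc : c ∈ PySem.Set.add (PySem.Set.add (PySem.Set.add (PySem.Set.add (PySem.Set.add
      (PySem.Set.add (PySem.Set.add PySem.Set.empty a) b) c) d) e) f) g := by
    simp [PySem.Set.mem_add, PySem.Set.empty]
  rw [PySem.Set.add_of_mem mc]
  have mb : b ∈ PySem.Set.add (PySem.Set.add (PySem.Set.add (PySem.Set.add (PySem.Set.add
      (PySem.Set.add (PySem.Set.add PySem.Set.empty a) b) c) d) e) f) g := by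
    simp [PySem.Set.mem_add, PySem.Set.empty]
  rw [PySem.Set.add_of_mem mb]
  have mf : f ∈ PySem.Set.add (PySem.Set.add (PySem.Set.add (PySem.Set.add (PySem.Set.add
      (PySem.Set.add (PySem.Set.add (PySem.Set.add PySem.Set.empty a) b) c) d) e) f) g) k := by
    simp [PySem.Set.mem_add, PySem.Set.empty]
  rw [PySem.Set.add_of_mem mf]
  have me : e ∈ PySem.Set.add (PySem.Set.add (PySem.Set.add (PySem.Set.add (PySem.Set.add
      (PySem.Set.add (PySem.Set.add (PySem.Set.add PySem.Set.empty a) b) c) d) e) f) g) k := by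
    simp [PySem.Set.mem_add, PySem.Set.empty]
  rw [PySem.Set.add_of_mem me]

-- A as the twelve additions, expressed over the eight canonical symmetry grids
theorem pvA_eq (image : List (List Int)) (w h : Nat) (F : Nat → Nat → Int)
    (hwdef : w = (image.headD []).length) (hhdef : h = image.length)
    (hFdef : F = fun i j => (image.getD (h - 1 - j) []).getD i 0)
    (hw : 0 < w) (hh : 0 < h) :
    flipturns image =
    PySem.Set.add (PySem.Set.add (PySem.Set.add (PySem.Set.add (PySem.Set.add
      (PySem.Set.add (PySem.Set.add (PySem.Set.add (PySem.Set.add (PySem.Set.add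
      (PySem.Set.add (PySem.Set.add PySem.Set.empty
      (pvGrid w h F))
      (pvGrid w h (fun i j => F i (h - 1 - j))))
      (pvGrid w h (fun i j => F (w - 1 - i) j)))
      (pvGrid h w (fun i j => F (w - 1 - j) i)))
      (pvGrid h w (fun i j => F j i)))
      (pvGrid h w (fun i j => F (w - 1 - j) (h - 1 - i))))
      (pvGrid w h (fun i j => F (w - 1 - i) (h - 1 - j))))
      (pvGrid w h (fun i j => F (w - 1 - i) j)))
      (pvGrid w h (fun i j => F i (h - 1 - j))))
      (pvGrid h w (fun i j => F j (h - 1 - i))))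
      (pvGrid h w (fun i j => F (w - 1 - j) (h - 1 - i))))
      (pvGrid h w (fun i j => F j i)) := by
  subst hwdef hhdef hFdef
  set w := (image.headD []).length
  set h := image.length
  set F : Nat → Nat → Int := fun i j => (image.getD (h - 1 - j) []).getD i 0 with hF
  have hb : pyRot image = pvGrid w h F := pv_rot_eq_grid image
  have hr2 : pyRot (pvGrid w h F) = pvGrid h w (fun i j => F (w - 1 - j) i) :=
    pv_rot_grid w h hw F
  have hr3 : pyRot (pvGrid h w (fun i j => F (w - 1 - j) i)) =
      pvGrid w h (fun i j => F (w - 1 - i) (h - 1 - j)) := by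
    rw [pv_rot_grid h w hh]
  have hr4 : pyRot (pvGrid w h (fun i j => F (w - 1 - i) (h - 1 - j))) =
      pvGrid h w (fun i j => F j (h - 1 - i)) := by
    rw [pv_rot_grid w h hw]
    apply pv_grid_congr
    intro i hi j hj
    have hjj : w - 1 - (w - 1 - j) = j := by omega
    rw [hjj]
  have hx2 : pyFlipx (pvGrid h w (fun i j => F (w - 1 - j) i)) =
      pvGrid h w (fun i j => F j i) := by
    rw [pv_flipx_grid]
    apply pv_grid_congr
    intro i hi j hj
    congr 1
    omega
  have hx3 : pyFlipx (pvGrid w h (fun i j => F (w - 1 - i) (h - 1 - j))) =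
      pvGrid w h (fun i j => F (w - 1 - i) j) := by
    rw [pv_flipx_grid]
    apply pv_grid_congr
    intro i hi j hj
    congr 1
    omega
  have hy3 : pyFlipy (pvGrid w h (fun i j => F (w - 1 - i) (h - 1 - j))) =
      pvGrid w h (fun i j => F i (h - 1 - j)) := by
    rw [pv_flipy_grid]
    apply pv_grid_congr
    intro i hi j hj
    congr 1
    omega
  have hx4 : pyFlipx (pvGrid h w (fun i j => F j (h - 1 - i))) =
      pvGrid h w (fun i j => F (w - 1 - j) (h - 1 - i)) := by
    rw [pv_flipx_grid]
  have hy4 : pyFlipy (pvGrid h w (fun i j => F j (h - 1 - i))) =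
      pvGrid h w (fun i j => F j i) := by
    rw [pv_flipy_grid]
    apply pv_grid_congr
    intro i hi j hj
    congr 1
    omega
  unfold flipturns
  rw [show List.range 4 = [0, 1, 2, 3] from rfl]
  simp only [List.foldl_cons, List.foldl_nil]
  rw [hb, hr2, hr3, hr4, pv_flipx_grid w h F, pv_flipy_grid w h F,
      hx2, pv_flipy_grid h w, hx3, hy3, hx4, hy4]

-- B as the eight additions over the same grids
theorem pvB_eq (image : List (List Int)) (w h : Nat) (F : Nat → Nat → Int)
    (hwdef : w = (image.headD []).length) (hhdef : h = image.length)
    (hFdef : F = fun i j => (image.getD (h - 1 - j) []).getD i 0)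
    (hw : 0 < w) (hh : 0 < h) :
    flipturns_alt image =
    PySem.Set.add (PySem.Set.add (PySem.Set.add (PySem.Set.add (PySem.Set.add
      (PySem.Set.add (PySem.Set.add (PySem.Set.add PySem.Set.empty
      (pvGrid w h F))
      (pvGrid w h (fun i j => F i (h - 1 - j))))
      (pvGrid w h (fun i j => F (w - 1 - i) j)))
      (pvGrid h w (fun i j => F (w - 1 - j) i)))
      (pvGrid h w (fun i j => F j i)))
      (pvGrid h w (fun i j => F (w - 1 - j) (h - 1 - i))))
      (pvGrid w h (fun i j => F (w - 1 - i) (h - 1 - j))))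
      (pvGrid h w (fun i j => F j (h - 1 - i))) := by
  subst hwdef hhdef hFdef
  simp only [flipturns_alt, List.foldl_cons, List.foldl_nil]
  congr 1
  · congr 1
    · congr 1
      · congr 1
        · congr 1
          · congr 1
            · congr 1
              · congr 1
                exact pv_grid_congr (fun i hi j hj => pv_grid_getD hi hj)
              · exact pv_grid_congr (fun i hi j hj => pv_grid_getD hi (by omega))
            · exact pv_grid_congr (fun i hi j hj => pv_grid_getD (by omega) hj)
          · exact pv_grid_congr (fun i hi j hj => pv_grid_getD (by omega) hi)
        · exact pv_grid_congr (fun i hi j hj => pv_grid_getD (by omega) hi)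
      · exact pv_grid_congr (fun i hi j hj => pv_grid_getD (by omega) (by omega))
    · exact pv_grid_congr (fun i hi j hj => pv_grid_getD (by omega) (by omega))
  · exact pv_grid_congr (fun i hi j hj => pv_grid_getD (by omega) (by omega))

-- ===== VERDICT (by name: the statement is the Claim_ definition above) =====
theorem flipturns_spec : Claim_equal_flipturns := by
  intro image _ hpre
  obtain ⟨hne, hw, _⟩ := hpre
  unfold Spec_flipturns
  have hh : 0 < image.length := List.length_pos_of_ne_nil hne
  rw [pvA_eq image _ _ _ rfl rfl rfl hw hh,
      pvB_eq image _ _ _ rfl rfl rfl hw hh]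
  exact pv_dedup _ _ _ _ _ _ _ _
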